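-- pv_equiv track=rewrite | github.com/pypi-data/pypi-mirror-52 | packages/bibtex2docs/bibtex2docs-0.1.2.0.tar.gz/bibtex2docs-0.1.2.0/bin/bibtex2docs.py | ref_to_str
-- ===== SOURCE A (Python) =====
-- def split_ref(ref):
--     ref = sorted(ref)
--     m, M = min(ref), max(ref)
--     res = []
--     a, end = 0,0
--     while end < ref[-1]:
--         while not a in ref:
--             a = a + 1
--         start = a
--         while a in ref:
--             a = a + 1
--         end = a - 1
--         if start != end:
--             res.append((start, end))
--         else:
--             res.append((start,))
--     return res
--
-- def ref_to_str(ref):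
--     s = '['
--     bits = split_ref(ref)
--     for b in bits:
--         if len(b) == 1:
--             s = s + '%s, '%b[0]
--         else:
--             s = s + '%s-%s, '%(b[0], b[1])
--     s = s[:-2] + ']'
--     return s
-- ===== SOURCE B (Python) =====
-- def ref_to_str(ref):
--     xs = sorted(set(x for x in ref if x >= 0))
--     runs = []  # list of [start, end] of maximal consecutive runs
--     for x in xs:
--         if runs and x == runs[-1][1] + 1:
--             runs[-1][1] = x
--         else:
--             runs.append([x, x])
--     parts = ['%s' % a if a == b else '%s-%s' % (a, b) for a, b in runs]
--     return '[' + ', '.join(parts) + ']'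
-- ===== Notes on version B (the rewrite author's own statement) =====
-- stated objective: faster
-- what changed: Replaces A's counter that scans every integer from 0 up to max(ref) with repeated list-membership tests by sort-and-deduplicate of the nonnegative entries followed by a single linear grouping pass.
-- intended difference: On nonempty lists with no positive entry A returns the malformed string ']' (its outer loop never runs, so '['[:-2]+']' collapses), while B returns the well-formed range string of the nonnegative values ('[]' when there are none), which is what a maintainer would want. — e.g. on ref_to_str([0]): A returns "]", B returns "[0]"
import Mathlib
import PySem

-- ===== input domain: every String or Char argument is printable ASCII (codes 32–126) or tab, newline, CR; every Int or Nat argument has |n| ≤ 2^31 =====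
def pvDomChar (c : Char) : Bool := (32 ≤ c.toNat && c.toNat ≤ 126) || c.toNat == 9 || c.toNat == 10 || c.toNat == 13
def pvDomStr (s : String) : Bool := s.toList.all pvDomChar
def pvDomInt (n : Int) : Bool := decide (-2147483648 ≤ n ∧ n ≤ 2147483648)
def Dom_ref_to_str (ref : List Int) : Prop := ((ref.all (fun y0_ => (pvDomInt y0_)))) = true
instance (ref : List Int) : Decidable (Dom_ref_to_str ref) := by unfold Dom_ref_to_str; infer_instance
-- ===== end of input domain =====

-- B replaces A's integer counter that scans 0..max(ref) with repeated membership
-- tests by sort+dedup of the nonnegative entries and one linear grouping pass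
-- (objective: faster). Like A, B ignores negative entries (reference numbers).

-- ===== PORT A =====
-- `while not a in ref: a = a + 1` (fuel bounds the scan; always sufficient under Pre_)
def pvSkip (s : List Int) : Int → Nat → Int
  | a, 0 => a
  | a, n+1 => if a ∈ s then a else pvSkip s (a+1) n

-- `while a in ref: a = a + 1`
def pvRun (s : List Int) : Int → Nat → Int
  | a, 0 => a
  | a, n+1 => if a ∈ s then pvRun s (a+1) n else a

-- the outer `while end < ref[-1]` loop of split_ref
def pvOuter (s : List Int) (last : Int) : Nat → Int → Int → List (List Int) → List (List Int)
  | 0, _, _, res => res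
  | n+1, a, endv, res =>
    if endv < last then
      let start := pvSkip s a ((last + 1 - a).toNat + 1)
      let a' := pvRun s start ((last + 2 - start).toNat + 1)
      let endv' := a' - 1
      let res' := if start ≠ endv' then res ++ [[start, endv']] else res ++ [[start]]
      pvOuter s last n a' endv' res'
    else res

-- Python's m, M = min(ref), max(ref) are computed but never used (they raise only on [],
-- which Pre_ excludes); tuples (start,) / (start,end) are ported as lists of length 1 / 2.
def split_ref (ref : List Int) : List (List Int) :=
  let r := PySem.List.sorted ref (fun x => x) false
  pvOuter r (PySem.List.pyGetD r (-1) 0) (ref.length + 1) 0 0 []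

def ref_to_str (ref : List Int) : String :=
  let bits := split_ref ref
  let s := bits.foldl (fun s b =>
    if b.length = 1 then
      s ++ PySem.Int.toStr (PySem.List.pyGetD b 0 0) ++ ", "
    else
      s ++ PySem.Int.toStr (PySem.List.pyGetD b 0 0) ++ "-" ++ PySem.Int.toStr (PySem.List.pyGetD b 1 0) ++ ", ") "["
  PySem.Str.slice s none (some (-2)) ++ "]"

-- ===== PORT B =====
-- `if runs and x == runs[-1][1] + 1: runs[-1][1] = x  else: runs.append([x, x])`
def pvStepB (runs : List (Int × Int)) (x : Int) : List (Int × Int) :=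
  match runs.getLast? with
  | some (a, b) => if x = b + 1 then runs.dropLast ++ [(a, x)] else runs ++ [(x, x)]
  | none => [(x, x)]

def ref_to_str_alt (ref : List Int) : String :=
  let xs := PySem.List.sorted (PySem.Set.ofList (ref.filter (fun x => 0 ≤ x))) (fun x => x) false
  let runs := xs.foldl pvStepB []
  let parts := runs.map (fun p =>
    if p.1 = p.2 then PySem.Int.toStr p.1
    else PySem.Int.toStr p.1 ++ "-" ++ PySem.Int.toStr p.2)
  "[" ++ PySem.Str.join ", " parts ++ "]"

-- ===== PRECONDITION & SPEC =====
-- Pre_ excludes only the empty list, on which A raises ValueError (min of empty sequence).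
def Pre_ref_to_str (ref : List Int) : Prop := ref ≠ []
instance (ref : List Int) : Decidable (Pre_ref_to_str ref) := by unfold Pre_ref_to_str; infer_instance

def pvWitness_ref_to_str : List Int := [1, 2, 3, 7, 9, 10]

-- On nonempty lists with no positive entry A's outer loop never runs and '['[:-2] + ']'
-- collapses to the malformed string ']'; B returns the well-formed range string of the
-- nonnegative values ('[]' when there are none), which is the intended value.
def D_ref_to_str (ref : List Int) : Prop := ref ≠ [] ∧ ∀ x ∈ ref, x ≤ 0
instance (ref : List Int) : Decidable (D_ref_to_str ref) := by unfold D_ref_to_str; infer_instance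

def Spec_ref_to_str (ref : List Int) (out : String) : Prop := ¬ D_ref_to_str ref → out = ref_to_str_alt ref
instance (ref : List Int) (out : String) : Decidable (Spec_ref_to_str ref out) := by unfold Spec_ref_to_str; infer_instance

def pvDiffWitness_ref_to_str : List Int := [0]
def pvDiffWitnessOut_ref_to_str : String × String := ("]", "[0]")

-- ===== CLAIM (what is proved, stated in full; the proofs are below) =====
def Claim_unchanged_ref_to_str : Prop := ∀ (ref : List Int), Dom_ref_to_str ref → Pre_ref_to_str ref → Spec_ref_to_str ref (ref_to_str ref)
def Claim_changed_ref_to_str : Prop := Dom_ref_to_str (pvDiffWitness_ref_to_str) ∧ Pre_ref_to_str (pvDiffWitness_ref_to_str) ∧ D_ref_to_str (pvDiffWitness_ref_to_str) ∧ ref_to_str (pvDiffWitness_ref_to_str) = pvDiffWitnessOut_ref_to_str.1 ∧ ref_to_str_alt (pvDiffWitness_ref_to_str) = pvDiffWitnessOut_ref_to_str.2 ∧ pvDiffWitnessOut_ref_to_str.1 ≠ pvDiffWitnessOut_ref_to_str.2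
def Claim_exact_ref_to_str : Prop := ∀ (ref : List Int), Dom_ref_to_str ref → Pre_ref_to_str ref → D_ref_to_str ref → ref_to_str ref ≠ ref_to_str_alt ref

-- ===== LEMMAS AND PROOFS =====

-- canonical grouping of a strictly increasing list into maximal consecutive runs
def pvGo (st : Int) : Int → List Int → List (Int × Int)
  | cur, [] => [(st, cur)]
  | cur, y :: ys => if y = cur + 1 then pvGo st y ys else (st, cur) :: pvGo y y ys

def pvGroups : List Int → List (Int × Int)
  | [] => []
  | x :: xs => pvGo x x xs

def pvFmt (p : Int × Int) : List Int := if p.1 ≠ p.2 then [p.1, p.2] else [p.1]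

lemma pvSkip_eq (s : List Int) (v : Int) (hv : v ∈ s) :
    ∀ (fuel : Nat) (a : Int), a ≤ v → (∀ c : Int, a ≤ c → c < v → c ∉ s) →
      (v - a).toNat < fuel → pvSkip s a fuel = v := by
  intro fuel
  induction fuel with
  | zero => intro a ha _ hf; omega
  | succ n ih =>
    intro a ha hmin hf
    by_cases hmem : a ∈ s
    · have : ¬ a < v := fun hlt => hmin a le_rfl hlt hmem
      have hav : a = v := by omega
      subst hav
      simp [pvSkip, hmem]
    · have hne : a ≠ v := fun h => hmem (h ▸ hv)
      have ha' : a + 1 ≤ v := by omega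
      simp only [pvSkip, hmem, if_false]
      exact ih (a+1) ha' (fun c hc1 hc2 => hmin c (by omega) hc2) (by omega)

lemma pvRun_eq (s : List Int) (e : Int) (hout : (e + 1) ∉ s) :
    ∀ (fuel : Nat) (a : Int), a ≤ e + 1 → (∀ c : Int, a ≤ c → c ≤ e → c ∈ s) →
      (e + 1 - a).toNat < fuel → pvRun s a fuel = e + 1 := by
  intro fuel
  induction fuel with
  | zero => intro a ha _ hf; omega
  | succ n ih =>
    intro a ha hin hf
    by_cases hmem : a ∈ s
    · have hne : a ≠ e + 1 := fun h => hout (h ▸ hmem)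
      simp only [pvRun, hmem, if_true]
      exact ih (a+1) (by omega) (fun c hc1 hc2 => hin c (by omega) hc2) (by omega)
    · have : ¬ a ≤ e := fun hle => hmem (hin a le_rfl hle)
      have hae : a = e + 1 := by omega
      subst hae
      simp [pvRun, hmem]

lemma pvGo_spec : ∀ (l : List Int) (st cur : Int), (cur :: l).Pairwise (· < ·) →
    ∃ e rest, pvGo st cur l = (st, e) :: pvGroups rest ∧
      cur ≤ e ∧
      (∀ c : Int, cur ≤ c → c ≤ e → c ∈ cur :: l) ∧
      ((e + 1) ∉ cur :: l) ∧
      (∀ x ∈ cur :: l, x ∈ rest ∨ x ≤ e) ∧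
      (∀ x ∈ rest, e + 1 < x) ∧
      (∀ x ∈ rest, x ∈ cur :: l) ∧
      rest.Pairwise (· < ·) ∧
      rest.length < (cur :: l).length := by
  intro l
  induction l with
  | nil =>
    intro st cur _
    refine ⟨cur, [], by simp [pvGo, pvGroups], le_rfl, ?_, ?_, ?_, ?_, ?_, ?_, ?_⟩
    · intro c h1 h2
      have : c = cur := le_antisymm h2 h1
      simp [this]
    · intro hmem
      simp only [List.mem_singleton] at hmem
      omega
    · intro x hx; right; simp only [List.mem_singleton] at hx; omega
    · simp
    · simp
    · simp
    · simp
  | cons y ys ih =>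
    intro st cur hp
    have hcy : cur < y := (List.pairwise_cons.mp hp).1 y (by simp)
    have hpy : (y :: ys).Pairwise (· < ·) := (List.pairwise_cons.mp hp).2
    by_cases hy : y = cur + 1
    · subst hy
      obtain ⟨e, rest, heq, hle, hin, hout, hcov, hgt, hsub, hprest, hlen⟩ := ih st (cur + 1) hpy
      refine ⟨e, rest, ?_, by omega, ?_, ?_, ?_, hgt, ?_, hprest, by simp at hlen ⊢; omega⟩
      · simp [pvGo, heq]
      · intro c h1 h2
        rcases eq_or_lt_of_le h1 with hc | hc
        · simp [← hc]
        · have : cur + 1 ≤ c := by omega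
          exact List.mem_cons_of_mem _ (hin c this h2)
      · intro hmem
        rcases List.mem_cons.mp hmem with h | h
        · omega
        · exact hout h
      · intro x hx
        rcases List.mem_cons.mp hx with h | h
        · right; omega
        · exact hcov x h
      · intro x hx
        exact List.mem_cons_of_mem _ (hsub x hx)
    · have hy2 : cur + 1 < y := by omega
      have hge : ∀ w ∈ y :: ys, y ≤ w := by
        intro w hw
        rcases List.mem_cons.mp hw with h | h
        · omega
        · exact le_of_lt ((List.pairwise_cons.mp hpy).1 w h)
      refine ⟨cur, y :: ys, ?_, le_rfl, ?_, ?_, ?_, ?_, ?_, hpy, by simp⟩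
      · simp [pvGo, hy, pvGroups]
      · intro c h1 h2
        have : c = cur := le_antisymm h2 h1
        simp [this]
      · intro hmem
        rcases List.mem_cons.mp hmem with h | h
        · omega
        · have := hge _ h; omega
      · intro x hx
        rcases List.mem_cons.mp hx with h | h
        · right; omega
        · left; exact h
      · intro x hx
        have := hge _ hx; omega
      · intro x hx
        exact List.mem_cons_of_mem _ hx


lemma pvOuter_eq (s : List Int) (last : Int) (hl1 : last ∈ s) (hl2 : ∀ x ∈ s, x ≤ last) :
    ∀ (f : Nat) (t : List Int) (a endv : Int) (res : List (List Int)),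
      t.Pairwise (· < ·) →
      (∀ x ∈ t, x ∈ s) →
      (∀ x ∈ s, x ∈ t ∨ x < a) →
      (∀ x ∈ t, a ≤ x) →
      (∀ x ∈ s, x ∈ t ∨ x ≤ endv) →
      (t ≠ [] → endv < last) →
      t.length < f →
      pvOuter s last f a endv res = res ++ (pvGroups t).map pvFmt := by
  intro f
  induction f with
  | zero => intro t a endv res _ _ _ _ _ _ hlen; exact absurd hlen (by omega)
  | succ n ih =>
    intro t a endv res hpt hsub hcov ha hcov2 htne hlen
    cases t with
    | nil =>
      have hend : last ≤ endv := by
        rcases hcov2 last hl1 with h | h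
        · simp at h
        · exact h
      simp only [pvOuter]
      rw [if_neg (by omega)]
      simp [pvGroups]
    | cons v l =>
      have hvs : v ∈ s := hsub v (by simp)
      have hvlast : v ≤ last := hl2 v hvs
      have hendv : endv < last := htne (by simp)
      have hav : a ≤ v := ha v (by simp)
      have hminT : ∀ w ∈ v :: l, v ≤ w := by
        intro w hw
        rcases List.mem_cons.mp hw with h | h
        · omega
        · exact le_of_lt ((List.pairwise_cons.mp hpt).1 w h)
      obtain ⟨e, rest, hgoeq, hle, hin, hout, hcov', hgt', hsub', hprest, hlenr⟩ :=
        pvGo_spec l v v hpt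
      have helast : e ≤ last := hl2 e (hsub e (hin e hle le_rfl))
      have hstart : pvSkip s a ((last + 1 - a).toNat + 1) = v := by
        refine pvSkip_eq s v hvs _ a hav ?_ (by omega)
        intro c hc1 hc2 hcs
        rcases hcov c hcs with h | h
        · have := hminT c h; omega
        · omega
      have hrun : pvRun s v ((last + 2 - v).toNat + 1) = e + 1 := by
        refine pvRun_eq s e ?_ _ v (by omega) ?_ (by omega)
        · intro hmem
          rcases hcov (e + 1) hmem with h | h
          · exact hout h
          · omega
        · intro c h1 h2
          exact hsub c (hin c h1 h2)
      simp only [pvOuter]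
      rw [if_pos (by omega), hstart, hrun]
      have he1 : e + 1 - 1 = e := by omega
      rw [he1]
      have hres : (if v ≠ e then res ++ [[v, e]] else res ++ [[v]]) = res ++ [pvFmt (v, e)] := by
        by_cases hve : v = e <;> simp [pvFmt, hve]
      rw [hres, ih rest (e + 1) e (res ++ [pvFmt (v, e)]) hprest
        (fun x hx => hsub x (hsub' x hx))
        (fun x hx => by
          rcases hcov x hx with h | h
          · rcases hcov' x h with h1 | h1
            · exact Or.inl h1
            · right; omega
          · right; omega)
        (fun x hx => by have := hgt' x hx; omega)
        (fun x hx => by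
          rcases hcov x hx with h | h
          · rcases hcov' x h with h1 | h1
            · exact Or.inl h1
            · right; omega
          · right; omega)
        (fun hne => by
          obtain ⟨y, hy⟩ := List.exists_mem_of_ne_nil rest hne
          have h1 := hgt' y hy
          have h2 := hl2 y (hsub y (hsub' y hy))
          omega)
        (by simp at hlenr hlen ⊢; omega)]
      have hgr : pvGroups (v :: l) = (v, e) :: pvGroups rest := hgoeq
      rw [hgr]
      simp

lemma pvStepB_acc (l : List Int) : ∀ (acc : List (Int × Int)) (st cur : Int),
    l.foldl pvStepB (acc ++ [(st, cur)]) = acc ++ pvGo st cur l := by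
  induction l with
  | nil => intro acc st cur; simp [pvGo]
  | cons y ys ih =>
    intro acc st cur
    simp only [List.foldl_cons, pvGo]
    by_cases hy : y = cur + 1
    · have : pvStepB (acc ++ [(st, cur)]) y = acc ++ [(st, y)] := by
        simp [pvStepB, hy]
      rw [this, ih, if_pos hy]
    · have : pvStepB (acc ++ [(st, cur)]) y = (acc ++ [(st, cur)]) ++ [(y, y)] := by
        simp [pvStepB, hy]
      rw [this, if_neg hy, ih (acc ++ [(st, cur)]) y y]
      simp

lemma pvFoldB_eq (u : List Int) : u.foldl pvStepB [] = pvGroups u := by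
  cases u with
  | nil => rfl
  | cons x xs =>
    have h0 : pvStepB [] x = [] ++ [(x, x)] := by simp [pvStepB]
    simp only [List.foldl_cons, h0, pvGroups]
    simpa using pvStepB_acc xs [] x x

lemma pvOfList_len (xs : List Int) : (PySem.Set.ofList xs).length ≤ xs.length := by
  have : ∀ (l : List Int) (s : List Int), (l.foldl PySem.Set.add s).length ≤ s.length + l.length := by
    intro l
    induction l with
    | nil => intro s; simp
    | cons y ys ih =>
      intro s
      simp only [List.foldl_cons]
      refine le_trans (ih _) ?_
      have hadd : (PySem.Set.add s y).length ≤ s.length + 1 := by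
        simp only [PySem.Set.add]; split <;> simp
      simp only [List.length_cons]; omega
  simpa [PySem.Set.ofList_eq_foldl] using this xs []

lemma pvLast_ge (s : List Int) (hp : s.Pairwise (· ≤ ·)) :
    ∀ (h : s ≠ []) (x : Int), x ∈ s → x ≤ s.getLast h := by
  induction s with
  | nil => intro h; simp at h
  | cons y t ih =>
    intro h x hx
    cases t with
    | nil =>
      simp at hx
      simp [hx]
    | cons z r =>
      have hyt : ∀ w ∈ z :: r, y ≤ w := (List.pairwise_cons.mp hp).1
      have hp' := (List.pairwise_cons.mp hp).2
      rw [List.getLast_cons (by simp)]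
      rcases List.mem_cons.mp hx with hxy | hx'
      · subst hxy
        exact hyt _ (List.getLast_mem (by simp))
      · exact ih hp' (by simp) x hx'

lemma split_ref_eq (ref : List Int) (h1 : ref ≠ []) (h2 : ∃ x ∈ ref, 1 ≤ x) :
    split_ref ref = (pvGroups (PySem.List.sorted (PySem.Set.ofList (ref.filter (fun x => 0 ≤ x))) (fun x => x) false)).map pvFmt := by
  have hrne : PySem.List.sorted ref (fun x => x) false ≠ [] := by
    simp [PySem.List.sorted_eq_nil_iff, h1]
  have hmem_r : ∀ x : Int, x ∈ PySem.List.sorted ref (fun x => x) false ↔ x ∈ ref := by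
    intro x; rw [PySem.List.mem_sorted]
  have hpair_r : (PySem.List.sorted ref (fun x => x) false).Pairwise (· ≤ ·) := by
    simpa using PySem.List.sorted_pairwise ref (fun x : Int => x)
  have hl1 := List.getLast_mem hrne
  have hl2 := pvLast_ge _ hpair_r
  have hpu : (PySem.List.sorted (PySem.Set.ofList (ref.filter (fun x => 0 ≤ x))) (fun x => x) false).Pairwise (· < ·) :=
    PySem.List.sorted_ofList_pairwise_lt (xs := ref.filter (fun x => 0 ≤ x))
  have hmem_u : ∀ x : Int, x ∈ PySem.List.sorted (PySem.Set.ofList (ref.filter (fun x => 0 ≤ x))) (fun x => x) false ↔ (x ∈ ref ∧ 0 ≤ x) := by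
    intro x
    rw [PySem.List.mem_sorted, PySem.Set.mem_ofList, List.mem_filter]
    simp
  have hlen_u : (PySem.List.sorted (PySem.Set.ofList (ref.filter (fun x => 0 ≤ x))) (fun x => x) false).length ≤ ref.length := by
    rw [PySem.List.length_sorted]
    exact le_trans (pvOfList_len _) (List.length_filter_le _ _)
  have hlastpos : 1 ≤ (PySem.List.sorted ref (fun x => x) false).getLast hrne := by
    obtain ⟨x, hx, hx1⟩ := h2
    have := hl2 hrne x ((hmem_r x).mpr hx)
    omega
  have hlast : PySem.List.pyGetD (PySem.List.sorted ref (fun x => x) false) (-1) 0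
      = (PySem.List.sorted ref (fun x => x) false).getLast hrne :=
    PySem.List.pyGetD_neg_one _ 0 hrne
  simp only [split_ref, hlast]
  exact pvOuter_eq _ _ hl1 (hl2 hrne) (ref.length + 1) _ 0 0 []
    hpu
    (fun x hx => (hmem_r x).mpr ((hmem_u x).mp hx).1)
    (fun x hx => by
      by_cases hx0 : (0:Int) ≤ x
      · exact Or.inl ((hmem_u x).mpr ⟨(hmem_r x).mp hx, hx0⟩)
      · right; omega)
    (fun x hx => ((hmem_u x).mp hx).2)
    (fun x hx => by
      by_cases hx0 : (0:Int) ≤ x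
      · exact Or.inl ((hmem_u x).mpr ⟨(hmem_r x).mp hx, hx0⟩)
      · right; omega)
    (fun _ => hlastpos)
    (by omega)

def pvPc (p : Int × Int) : List Char :=
  if p.1 = p.2 then PySem.Int.toChars p.1
  else PySem.Int.toChars p.1 ++ '-' :: PySem.Int.toChars p.2

lemma pvGo_ne : ∀ (l : List Int) (st cur : Int), pvGo st cur l ≠ [] := by
  intro l
  induction l with
  | nil => intro st cur; simp [pvGo]
  | cons y ys ih =>
    intro st cur
    simp only [pvGo]
    split
    · exact ih st y
    · simp

lemma pvFlatten : ∀ (ps : List (List Char)), ps ≠ [] →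
    (ps.map (fun p => p ++ [',', ' '])).flatten = PySem.Chars.join [',', ' '] ps ++ [',', ' '] := by
  intro ps
  induction ps with
  | nil => intro h; exact absurd rfl h
  | cons p qs ih =>
    intro _
    cases qs with
    | nil => simp [PySem.Chars.join_singleton]
    | cons q r =>
      rw [List.map_cons, List.flatten_cons, ih (by simp), PySem.Chars.join_cons_cons]
      simp

lemma pvFoldA : ∀ (gs : List (Int × Int)) (init : String),
    ((gs.map pvFmt).foldl (fun s b =>
      if b.length = 1 then
        s ++ PySem.Int.toStr (PySem.List.pyGetD b 0 0) ++ ", "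
      else
        s ++ PySem.Int.toStr (PySem.List.pyGetD b 0 0) ++ "-" ++ PySem.Int.toStr (PySem.List.pyGetD b 1 0) ++ ", ") init).toList
    = init.toList ++ ((gs.map pvPc).map (fun p => p ++ [',', ' '])).flatten := by
  intro gs
  induction gs with
  | nil => intro init; simp
  | cons p qs ih =>
    intro init
    by_cases hp : p.1 = p.2
    · have hf : pvFmt p = [p.1] := by simp [pvFmt, hp]
      simp [hf, ih, pvPc, hp, PySem.Int.toList_toStr, PySem.List.pyGetD_zero_cons]
    · have hf : pvFmt p = [p.1, p.2] := by simp [pvFmt, hp]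
      have h1 : PySem.List.pyGetD [p.1, p.2] 1 0 = p.2 := by
        simp [PySem.List.pyGetD]
      simp [hf, ih, pvPc, hp, PySem.Int.toList_toStr, PySem.List.pyGetD_zero_cons, h1]

lemma pvAltPart (p : Int × Int) :
    (if p.1 = p.2 then PySem.Int.toStr p.1
     else PySem.Int.toStr p.1 ++ "-" ++ PySem.Int.toStr p.2).toList = pvPc p := by
  by_cases hp : p.1 = p.2 <;> simp [pvPc, hp, PySem.Int.toList_toStr]

-- ===== VERDICT (by name: the statement is the Claim_ definition above) =====
theorem ref_to_str_spec : Claim_unchanged_ref_to_str := by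
  intro ref _ hpre
  unfold Spec_ref_to_str
  intro hnd
  have h2 : ∃ x ∈ ref, 1 ≤ x := by
    rcases not_and_or.mp hnd with h | h
    · exact absurd hpre (by simpa [Pre_ref_to_str] using h)
    · push Not at h
      obtain ⟨x, hx, hx0⟩ := h
      exact ⟨x, hx, by omega⟩
  have hpre' : ref ≠ [] := hpre
  apply String.toList_inj.mp
  have hune : PySem.List.sorted (PySem.Set.ofList (ref.filter (fun x => 0 ≤ x))) (fun x => x) false ≠ [] := by
    obtain ⟨x, hx, hx1⟩ := h2
    intro hu
    have hxm : x ∈ PySem.List.sorted (PySem.Set.ofList (ref.filter (fun x => 0 ≤ x))) (fun x => x) false := by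
      rw [PySem.List.mem_sorted, PySem.Set.mem_ofList, List.mem_filter]
      simpa using ⟨hx, by omega⟩
    simp [hu] at hxm
  have hgne : pvGroups (PySem.List.sorted (PySem.Set.ofList (ref.filter (fun x => 0 ≤ x))) (fun x => x) false) ≠ [] := by
    cases hu : PySem.List.sorted (PySem.Set.ofList (ref.filter (fun x => 0 ≤ x))) (fun x => x) false with
    | nil => exact absurd hu hune
    | cons x xs => simp only [pvGroups]; exact pvGo_ne xs x x
  have hbr : ∀ (s : String), (PySem.Str.slice s none (some (-2)) ++ "]").toList
      = PySem.List.slice s.toList none (some (-2)) ++ [']'] := by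
    intro s; simp
  have htake : ∀ (J : List Char), PySem.List.slice ('[' :: (J ++ [',', ' '])) none (some (-2)) = '[' :: J := by
    intro J
    rw [PySem.List.slice_to_neg_ofNat _ 2 (by omega)]
    have h : ('[' :: (J ++ [',', ' '])) = ('[' :: J) ++ [',', ' '] := by simp
    rw [h, List.take_left' (by simp)]
  have hbr2 : ∀ (ps : List String), ("[" ++ PySem.Str.join ", " ps ++ "]").toList
      = '[' :: (PySem.Chars.join [',', ' '] (ps.map String.toList) ++ [']']) := by
    intro ps
    have h1 : ", ".toList = [',', ' '] := rfl
    have hx2 : "]".toList = [']'] := rfl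
    have h3 : "[".toList = ['['] := rfl
    simp [h1, hx2, h3]
  have hmap : ((pvGroups (PySem.List.sorted (PySem.Set.ofList (ref.filter (fun x => 0 ≤ x))) (fun x => x) false)).map (fun p : Int × Int =>
      if p.1 = p.2 then PySem.Int.toStr p.1
      else PySem.Int.toStr p.1 ++ "-" ++ PySem.Int.toStr p.2)).map String.toList
      = (pvGroups (PySem.List.sorted (PySem.Set.ofList (ref.filter (fun x => 0 ≤ x))) (fun x => x) false)).map pvPc := by
    rw [List.map_map]
    exact List.map_congr_left (fun p _ => pvAltPart p)
  simp only [ref_to_str, ref_to_str_alt, split_ref_eq ref hpre' h2, pvFoldB_eq]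
  rw [hbr, pvFoldA, pvFlatten _ (by simpa using hgne), hbr2, hmap]
  have h3 : "[".toList = ['['] := rfl
  rw [h3]
  rw [show ['['] ++ (PySem.Chars.join [',', ' '] ((pvGroups (PySem.List.sorted (PySem.Set.ofList (ref.filter (fun x => 0 ≤ x))) (fun x => x) false)).map pvPc) ++ [',', ' '])
      = '[' :: ((PySem.Chars.join [',', ' '] ((pvGroups (PySem.List.sorted (PySem.Set.ofList (ref.filter (fun x => 0 ≤ x))) (fun x => x) false)).map pvPc)) ++ [',', ' ']) by simp]
  rw [htake]
  simp

theorem ref_to_str_changed : Claim_changed_ref_to_str := by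
  unfold Claim_changed_ref_to_str; decide

theorem ref_to_str_tight : Claim_exact_ref_to_str := by
  unfold Claim_exact_ref_to_str
  intro ref _ hpre hd heq
  obtain ⟨hne, hle⟩ := hd
  have hrne : PySem.List.sorted ref (fun x => x) false ≠ [] := by
    simp [PySem.List.sorted_eq_nil_iff, hne]
  have hlast_le : (PySem.List.sorted ref (fun x => x) false).getLast hrne ≤ 0 := by
    have hm := List.getLast_mem hrne
    rw [PySem.List.mem_sorted] at hm
    exact hle _ hm
  have hA : ref_to_str ref = "]" := by
    have hlast : PySem.List.pyGetD (PySem.List.sorted ref (fun x => x) false) (-1) 0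
        = (PySem.List.sorted ref (fun x => x) false).getLast hrne :=
      PySem.List.pyGetD_neg_one _ 0 hrne
    simp only [ref_to_str, split_ref, hlast]
    simp only [pvOuter]
    rw [if_neg (by omega)]
    simp only [List.foldl_nil]
    decide
  rw [hA] at heq
  have htl := congrArg String.toList heq
  have hx2 : "]".toList = [']'] := rfl
  have h3 : "[".toList = ['['] := rfl
  simp only [ref_to_str_alt, hx2] at htl
  rw [show ("[" ++ PySem.Str.join ", " (((ref.filter (fun x => 0 ≤ x)
      |> PySem.Set.ofList |> (PySem.List.sorted · (fun x => x) false)).foldl pvStepB []).map (fun p =>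
        if p.1 = p.2 then PySem.Int.toStr p.1
        else PySem.Int.toStr p.1 ++ "-" ++ PySem.Int.toStr p.2)) ++ "]").toList
    = '[' :: ((PySem.Str.join ", " (((ref.filter (fun x => 0 ≤ x)
      |> PySem.Set.ofList |> (PySem.List.sorted · (fun x => x) false)).foldl pvStepB []).map (fun p =>
        if p.1 = p.2 then PySem.Int.toStr p.1
        else PySem.Int.toStr p.1 ++ "-" ++ PySem.Int.toStr p.2))).toList ++ [']']) from by simp [h3]] at htl
  exact absurd (List.head_eq_of_cons_eq htl.symm) (by decide)
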